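-- pv_equiv track=rewrite | github.com/Cody-Reimers/py110_programs | lesson_1/adjacent_consonants.py | calculate_adjacent_consonant_runs
-- ===== SOURCE A (Python) =====
-- VOWELS = ("a", "e", "i", "o", "u")
--
-- def calculate_adjacent_consonant_runs(text):
--     lengths = {}
--
--     for line in text:
--         length = 0
--         length_record = 1
--         letters = "".join(line.split()).lower()
--
--         for letter in letters:
--             if letter in VOWELS:
--                 length_record = max(length_record, length)
--                 length = 0
--                 continue
--
--             length += 1
--
--         lengths[line] = max(length_record, length)
--
--     return lengths
-- ===== SOURCE B (Python) =====
-- VOWELS = ("a", "e", "i", "o", "u")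
--
-- def calculate_adjacent_consonant_runs(text):
--     def line_value(line):
--         letters = "".join(line.split()).lower()
--         runs = "".join(" " if ch in VOWELS else ch for ch in letters).split()
--         return max([1] + [len(run) for run in runs])
--
--     return {line: line_value(line) for line in dict.fromkeys(text)}
-- ===== Notes on version B (the rewrite author's own statement) =====
-- stated objective: simpler
-- what changed: Replaces A's dict-building fold with a running length/record counter per line by a dict comprehension over the deduplicated lines, where each line's value is obtained by mapping vowels to spaces, splitting into consonant-run tokens and taking the maximum token length floored at 1.
import Mathlib
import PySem

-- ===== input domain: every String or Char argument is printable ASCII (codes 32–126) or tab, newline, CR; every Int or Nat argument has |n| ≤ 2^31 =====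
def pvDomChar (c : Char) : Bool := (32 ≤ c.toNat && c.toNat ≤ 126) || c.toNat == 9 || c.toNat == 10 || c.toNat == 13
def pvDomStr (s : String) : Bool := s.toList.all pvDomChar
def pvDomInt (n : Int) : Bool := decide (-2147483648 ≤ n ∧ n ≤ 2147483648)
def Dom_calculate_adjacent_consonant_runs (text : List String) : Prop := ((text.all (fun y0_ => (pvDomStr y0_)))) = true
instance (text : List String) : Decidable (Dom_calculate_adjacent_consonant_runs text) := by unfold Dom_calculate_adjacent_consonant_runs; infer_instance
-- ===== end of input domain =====

-- B replaces A's fold of dict inserts with a running counter scan by a dict comprehension over the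
-- deduplicated lines whose per-line value splits the cleaned line into consonant-run tokens
-- (vowels mapped to spaces) and takes the maximum token length floored at 1; objective: simpler.

-- VOWELS = ("a", "e", "i", "o", "u")  (module constant shared by A and B)
def pvVOWELS : List String := ["a", "e", "i", "o", "u"]

-- 'letter in VOWELS' (letter is a 1-character string in Python)
def pvIsVowel (letter : Char) : Bool := pvVOWELS.contains (String.ofList [letter])

-- ===== PORT A =====
def calculate_adjacent_consonant_runs (text : List String) : List (String × Int) :=
  (text.foldl
    (fun (lengths : PySem.Dict String Int) line =>
      -- letters = "".join(line.split()).lower()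
      let letters := PySem.Chars.lower (PySem.Chars.join [] (PySem.Chars.split₀ line.toList))
      -- for letter in letters:  (state = (length, length_record), start (0, 1))
      let st := letters.foldl
        (fun (p : Int × Int) letter =>
          if pvIsVowel letter then (0, max p.2 p.1) else (p.1 + 1, p.2))
        (0, 1)
      -- lengths[line] = max(length_record, length)
      lengths.insert line (max st.2 st.1))
    (PySem.Dict.mk [])).items

-- ===== PORT B =====
-- def line_value(line): map vowels to spaces, split into consonant-run tokens, max length floored at 1
def pvLineValue (line : String) : Int :=
  let letters := PySem.Chars.lower (PySem.Chars.join [] (PySem.Chars.split₀ line.toList))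
  let runs := PySem.Chars.split₀
    (PySem.Chars.join [] (letters.map (fun ch => if pvIsVowel ch then [' '] else [ch])))
  (runs.map (fun run => (run.length : Int))).foldl max 1

-- {line: line_value(line) for line in dict.fromkeys(text)}
-- (dict.fromkeys(text) → PySem.List.dedup; the comprehension's keys are distinct, so the resulting
--  dict's item list is exactly the map over those keys)
def calculate_adjacent_consonant_runs_alt (text : List String) : List (String × Int) :=
  (PySem.List.dedup text).map (fun line => (line, pvLineValue line))

-- ===== PRECONDITION & SPEC =====
def Spec_calculate_adjacent_consonant_runs (text : List String) (out : List (String × Int)) : Prop := out = calculate_adjacent_consonant_runs_alt text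
instance (text : List String) (out : List (String × Int)) : Decidable (Spec_calculate_adjacent_consonant_runs text out) := by unfold Spec_calculate_adjacent_consonant_runs; infer_instance

-- ===== CLAIM (what is proved, stated in full; the proofs are below) =====
def Claim_equal_calculate_adjacent_consonant_runs : Prop := ∀ (text : List String), Dom_calculate_adjacent_consonant_runs text → Spec_calculate_adjacent_consonant_runs text (calculate_adjacent_consonant_runs text)

-- ===== LEMMAS AND PROOFS =====

-- the vowel→space map of B, on single characters
def pvF (c : Char) : Char := if pvIsVowel c then ' ' else c

-- best consonant-run length of cs when a run of length l is already pending (the common spec of both loops)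
def pvG : List Char → Int → Int
  | [], l => l
  | c :: t, l => if pvIsVowel c then max l (pvG t 0) else pvG t (l + 1)

-- the cleaned character list both programs scan
def pvClean (line : String) : List Char :=
  PySem.Chars.lower (PySem.Chars.join [] (PySem.Chars.split₀ line.toList))

-- per-line value of A
def pvValA (line : String) : Int :=
  let letters := pvClean line
  let st := letters.foldl
    (fun (p : Int × Int) letter =>
      if pvIsVowel letter then (0, max p.2 p.1) else (p.1 + 1, p.2))
    (0, 1)
  max st.2 st.1

-- max of run lengths, floored at 1
def pvM (parts : List (List Char)) : Int :=
  (parts.map (fun run => (run.length : Int))).foldl max 1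

theorem pvG_nonneg (cs : List Char) : ∀ l : Int, 0 ≤ l → 0 ≤ pvG cs l := by
  induction cs with
  | nil => intro l hl; simpa [pvG] using hl
  | cons c t ih =>
    intro l hl
    by_cases hv : pvIsVowel c
    · simp only [pvG, hv, if_pos]
      exact le_max_of_le_right (ih 0 le_rfl)
    · simp only [pvG, hv, if_neg, Bool.false_eq_true, not_false_iff]
      exact ih (l + 1) (by omega)

theorem pvScan (cs : List Char) : ∀ l r : Int,
    (let st := cs.foldl
      (fun (p : Int × Int) letter =>
        if pvIsVowel letter then (0, max p.2 p.1) else (p.1 + 1, p.2)) (l, r)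
     max st.2 st.1) = max r (pvG cs l) := by
  induction cs with
  | nil => intro l r; simp [pvG, max_comm]
  | cons c t ih =>
    intro l r
    by_cases hv : pvIsVowel c
    · simp only [List.foldl_cons, hv, if_pos, pvG]
      rw [ih 0 (max r l)]
      omega
    · simp only [List.foldl_cons, hv, Bool.false_eq_true, if_neg, not_false_iff, pvG]
      exact ih (l + 1) r

theorem pv_foldl_max_init (xs : List Int) : ∀ v w : Int, xs.foldl max (max v w) = max v (xs.foldl max w) := by
  induction xs with
  | nil => intro v w; rfl
  | cons x t ih =>
    intro v w
    simp only [List.foldl_cons]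
    rw [max_assoc, ih]

theorem pv_foldl_max_reverse (xs : List Int) : ∀ v : Int, xs.reverse.foldl max v = xs.foldl max v := by
  induction xs with
  | nil => intro v; rfl
  | cons x t ih =>
    intro v
    simp only [List.reverse_cons, List.foldl_append, List.foldl_cons, List.foldl_nil, ih v]
    rw [show max v x = max x v from max_comm v x, pv_foldl_max_init]
    omega

theorem pvM_cons (x : List Char) (acc : List (List Char)) :
    pvM (x :: acc) = max (x.length : Int) (pvM acc) := by
  simp only [pvM, List.map_cons, List.foldl_cons]
  rw [show max 1 (x.length : Int) = max (x.length : Int) 1 from max_comm _ _, pv_foldl_max_init]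

theorem pvM_reverse (acc : List (List Char)) : pvM acc.reverse = pvM acc := by
  simp only [pvM, List.map_reverse]
  exact pv_foldl_max_reverse _ 1

theorem pvM_pos (acc : List (List Char)) : 1 ≤ pvM acc :=
  (PySem.List.le_foldl_max _ _).1

-- the split of B's mapped string computes exactly the best run length (with the pending run cur)
theorem pvGo (cs : List Char) : ∀ (cur : List Char) (acc : List (List Char)),
    (∀ c ∈ cs, PySem.Chars.isspace c = false) →
    pvM (PySem.Chars.split₀.go (cs.map pvF) cur acc) = max (pvM acc) (pvG cs (cur.length : Int)) := by
  induction cs with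
  | nil =>
    intro cur acc _
    simp only [List.map_nil, PySem.Chars.split₀.go, pvG]
    by_cases hc : cur.isEmpty
    · have h1 := pvM_pos acc
      rw [if_pos hc, pvM_reverse]
      have : cur.length = 0 := by simpa [List.isEmpty_iff] using hc
      rw [this]
      omega
    · rw [if_neg hc, pvM_reverse, pvM_cons, List.length_reverse]
      omega
  | cons c t ih =>
    intro cur acc h
    have hc : PySem.Chars.isspace c = false := h c (List.mem_cons_self)
    have ht : ∀ x ∈ t, PySem.Chars.isspace x = false := fun x hx => h x (List.mem_cons_of_mem _ hx)
    simp only [List.map_cons]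
    by_cases hv : pvIsVowel c
    · have hfc : pvF c = ' ' := by simp [pvF, hv]
      rw [hfc]
      simp only [PySem.Chars.split₀.go, show PySem.Chars.isspace ' ' = true from rfl, if_pos]
      by_cases hcur : cur.isEmpty
      · rw [if_pos hcur, ih [] acc ht]
        have : cur.length = 0 := by simpa [List.isEmpty_iff] using hcur
        have h0 := pvG_nonneg t 0 le_rfl
        simp only [pvG, hv, if_pos, this, List.length_nil, Nat.cast_zero]
        omega
      · rw [if_neg hcur, ih [] (cur.reverse :: acc) ht, pvM_cons, List.length_reverse]
        simp only [pvG, hv, if_pos, List.length_nil, Nat.cast_zero]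
        omega
    · have hfc : pvF c = c := by simp [pvF, hv]
      rw [hfc]
      simp only [PySem.Chars.split₀.go, hc, Bool.false_eq_true, if_neg, not_false_iff]
      rw [ih (c :: cur) acc ht]
      simp only [pvG, hv, Bool.false_eq_true, if_neg, not_false_iff, List.length_cons]
      push_cast
      rfl

-- "".join of singleton pieces is the mapped character list
theorem pv_join_nil_flatten (parts : List (List Char)) : PySem.Chars.join [] parts = parts.flatten := by
  simp only [PySem.Chars.join]
  induction parts with
  | nil => rfl
  | cons x t ih =>
    cases t with
    | nil => simp [List.intercalate]
    | cons y t' =>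
      simp only [List.intercalate, List.intersperse] at ih ⊢
      simp_all

theorem pv_flatten_map (cs : List Char) :
    (cs.map (fun letter => if pvIsVowel letter then [' '] else [letter])).flatten = cs.map pvF := by
  induction cs with
  | nil => rfl
  | cons c t ih =>
    simp only [List.map_cons, List.flatten_cons, ih]
    by_cases hv : pvIsVowel c <;> simp [pvF, hv]

-- split₀ never leaves whitespace inside a token
theorem pv_split₀_go_nonspace (s : List Char) : ∀ (cur : List Char) (acc : List (List Char)),
    (∀ c ∈ cur, PySem.Chars.isspace c = false) →
    (∀ r ∈ acc, ∀ c ∈ r, PySem.Chars.isspace c = false) →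
    ∀ r ∈ PySem.Chars.split₀.go s cur acc, ∀ c ∈ r, PySem.Chars.isspace c = false := by
  induction s with
  | nil =>
    intro cur acc hcur hacc r hr c hcr
    simp only [PySem.Chars.split₀.go] at hr
    by_cases hc : cur.isEmpty
    · rw [if_pos hc] at hr
      exact hacc r (List.mem_reverse.mp hr) c hcr
    · rw [if_neg hc] at hr
      rcases List.mem_cons.mp (List.mem_reverse.mp hr) with h | h
      · exact hcur c (List.mem_reverse.mp (h ▸ hcr))
      · exact hacc r h c hcr
  | cons x t ih =>
    intro cur acc hcur hacc r hr c hcr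
    simp only [PySem.Chars.split₀.go] at hr
    by_cases hx : PySem.Chars.isspace x
    · rw [if_pos hx] at hr
      by_cases hc : cur.isEmpty
      · rw [if_pos hc] at hr
        exact ih [] acc (by simp) hacc r hr c hcr
      · rw [if_neg hc] at hr
        refine ih [] (cur.reverse :: acc) (by simp) ?_ r hr c hcr
        intro r' hr' c' hc'
        rcases List.mem_cons.mp hr' with h | h
        · exact hcur c' (List.mem_reverse.mp (h ▸ hc'))
        · exact hacc r' h c' hc'
    · rw [if_neg hx] at hr
      refine ih (x :: cur) acc ?_ hacc r hr c hcr
      intro c' hc'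
      rcases List.mem_cons.mp hc' with h | h
      · exact h ▸ (by simpa using hx)
      · exact hcur c' h

theorem pv_lowerChar_nonspace (c : Char) (h : PySem.Chars.isspace c = false) :
    PySem.Chars.isspace (PySem.Chars.lowerChar c) = false := by
  unfold PySem.Chars.lowerChar
  by_cases hu : PySem.Chars.isupper c
  · rw [if_pos hu]
    simp only [PySem.Chars.isupper, Bool.and_eq_true, decide_eq_true_eq, Char.le_def] at hu
    have h65 : 65 ≤ c.toNat := by
      have h := UInt32.le_iff_toNat_le.mp hu.1
      exact le_trans (by decide) h
    have h90 : c.toNat ≤ 90 := by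
      have h := UInt32.le_iff_toNat_le.mp hu.2
      exact le_trans h (by decide)
    have hval : (Char.ofNat (c.toNat + 32)).toNat = c.toNat + 32 := by
      rw [Char.toNat_ofNat]
      simp only [Nat.isValidChar]
      rw [if_pos (by omega)]
    simp only [PySem.Chars.isspace, hval]
    simp only [Bool.or_eq_false_iff, Bool.and_eq_false_iff, decide_eq_false_iff_not]
    omega
  · rw [if_neg hu]; exact h

theorem pvClean_nonspace (line : String) : ∀ c ∈ pvClean line, PySem.Chars.isspace c = false := by
  intro c hc
  simp only [pvClean, PySem.Chars.lower, List.mem_map] at hc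
  obtain ⟨c', hc', rfl⟩ := hc
  apply pv_lowerChar_nonspace
  rw [pv_join_nil_flatten] at hc'
  obtain ⟨r, hr, hcr⟩ := List.mem_flatten.mp hc'
  exact pv_split₀_go_nonspace line.toList [] [] (by simp) (by simp) r hr c' hcr

-- the per-line values of the two programs agree
theorem pvVal_eq (line : String) : pvValA line = pvLineValue line := by
  have hns := pvClean_nonspace line
  unfold pvValA pvLineValue
  rw [pvScan (pvClean line) 0 1]
  show max 1 (pvG (pvClean line) 0)
      = pvM (PySem.Chars.split₀ (PySem.Chars.join [] ((pvClean line).map (fun letter => if pvIsVowel letter then [' '] else [letter]))))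
  simp only [pv_join_nil_flatten, pv_flatten_map]
  show max 1 (pvG (pvClean line) 0) = pvM (PySem.Chars.split₀.go ((pvClean line).map pvF) [] [])
  rw [pvGo (pvClean line) [] [] hns]
  simp [pvM]

-- folding dict inserts of f-values over text, starting from the dict holding the f-pairs of a
-- nodup key list L, yields the f-pairs of (text folded into L as a set)
theorem pv_dict_fold (f : String → Int) (text : List String) : ∀ (L : List String),
    (text.foldl (fun (d : PySem.Dict String Int) line => d.insert line (f line))
      (PySem.Dict.mk (L.map (fun l => (l, f l))))).items
    = (text.foldl PySem.Set.add L).map (fun l => (l, f l)) := by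
  induction text with
  | nil => intro L; rfl
  | cons line t ih =>
    intro L
    have hstep : (PySem.Dict.mk (L.map (fun l => (l, f l)))).insert line (f line)
        = PySem.Dict.mk ((PySem.Set.add L line).map (fun l => (l, f l))) := by
      apply PySem.Dict.ext
      by_cases hm : line ∈ L
      · rw [PySem.Dict.items_insert_of_contains]
        · rw [PySem.Set.add_of_mem hm]
          show (L.map (fun l => (l, f l))).map (fun p => if p.1 == line then (line, f line) else p)
              = L.map (fun l => (l, f l))
          rw [List.map_map]
          apply List.map_congr_left
          intro l _
          by_cases h : l = line
          · simp [h]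
          · simp [Function.comp, h]
        · rw [PySem.Dict.contains_eq_decide_mem_keys]
          simp only [PySem.Dict.keys, List.map_map]
          simpa using hm
      · rw [PySem.Dict.items_insert_of_not_contains]
        · rw [PySem.Set.add_of_not_mem hm]
          simp
        · rw [PySem.Dict.contains_eq_decide_mem_keys]
          simp only [PySem.Dict.keys, List.map_map]
          simpa using hm
    simp only [List.foldl_cons, hstep, ih]

-- ===== VERDICT (by name: the statement is the Claim_ definition above) =====
theorem calculate_adjacent_consonant_runs_spec : Claim_equal_calculate_adjacent_consonant_runs := by
  intro text _
  show calculate_adjacent_consonant_runs text = calculate_adjacent_consonant_runs_alt text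
  have hA : calculate_adjacent_consonant_runs text
      = (text.foldl (fun (d : PySem.Dict String Int) line => d.insert line (pvValA line))
          (PySem.Dict.mk (([] : List String).map (fun l => (l, pvValA l))))).items := rfl
  rw [hA, pv_dict_fold pvValA text []]
  show (text.foldl PySem.Set.add []).map (fun l => (l, pvValA l))
      = (PySem.List.dedup text).map (fun line => (line, pvLineValue line))
  rw [funext pvVal_eq, PySem.List.dedup_eq_ofList, PySem.Set.ofList_eq_foldl]
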